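-- pv_equiv track=rewrite | github.com/suryanashwin4u/DSA_PYTHON | Extract Maximum.py | extractMaximum
-- ===== SOURCE A (Python) =====
-- def extractMaximum(S):
--     max_num = -1
--     current = 0
--     found = False
--
--     for ch in S:
--         if ch.isdigit():
--             current = current * 10 + int(ch)
--             found = True
--         else:
--             if found:
--                 max_num = max(max_num, current)
--                 current = 0
--                 found = False
--
--     # check last number
--     if found:
--         max_num = max(max_num, current)
--
--     return max_num
-- ===== SOURCE B (Python) =====
-- import re
--
-- def extractMaximum(S):
--     return max((int(g) for g in re.findall(r'[0-9]+', S)), default=-1)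
-- ===== Notes on version B (the rewrite author's own statement) =====
-- stated objective: idiomatic
-- what changed: Replaces the character-by-character accumulate-and-reset state machine with regex tokenization of maximal digit runs followed by a single max reduction with default -1.
import Mathlib
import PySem

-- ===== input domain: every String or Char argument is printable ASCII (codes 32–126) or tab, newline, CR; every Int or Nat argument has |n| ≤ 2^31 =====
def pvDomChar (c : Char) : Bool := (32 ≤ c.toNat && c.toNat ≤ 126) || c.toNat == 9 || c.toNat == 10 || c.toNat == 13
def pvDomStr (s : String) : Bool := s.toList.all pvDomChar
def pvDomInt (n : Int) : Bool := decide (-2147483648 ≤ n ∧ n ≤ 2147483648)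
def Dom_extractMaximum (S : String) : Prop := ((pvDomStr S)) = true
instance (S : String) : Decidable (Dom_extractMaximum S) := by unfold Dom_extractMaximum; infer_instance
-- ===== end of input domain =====

-- B replaces A's character-by-character accumulate-and-reset state machine with
-- tokenization into maximal digit runs followed by one max reduction (idiomatic; same cost).

-- ===== PORT A =====
-- int(ch) for a single digit ch is its digit value; ported exactly as ch.toNat - 48 (only reached when isdigit ch)
def pvStepA (st : Int × Int × Bool) (ch : Char) : Int × Int × Bool :=
  if PySem.Chars.isdigit ch then (st.1, st.2.1 * 10 + ((ch.toNat : Int) - 48), true)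
  else if st.2.2 then (max st.1 st.2.1, 0, false) else st

def extractMaximum (S : String) : Int :=
  let r := S.toList.foldl pvStepA (-1, 0, false)
  if r.2.2 then max r.1 r.2.1 else r.1

-- ===== PORT B =====
-- maximal runs of consecutive digit characters (re.findall(r'[0-9]+', S))
def pvRuns : List Char → List (List Char)
  | [] => []
  | c :: cs =>
    if PySem.Chars.isdigit c then
      (c :: cs.takeWhile PySem.Chars.isdigit) :: pvRuns (cs.dropWhile PySem.Chars.isdigit)
    else pvRuns cs
termination_by l => l.length
decreasing_by
  · exact Nat.lt_succ_of_le (List.length_dropWhile_le _ _)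
  · simp

def pvStep (acc : Int) (c : Char) : Int := acc * 10 + ((c.toNat : Int) - 48)

-- int(g) for a nonempty digit run g (exact on digit strings)
def pvVal (g : List Char) : Int := g.foldl pvStep 0

def extractMaximum_alt (S : String) : Int :=
  ((pvRuns S.toList).map pvVal).foldl max (-1)

-- ===== PRECONDITION & SPEC =====
def Spec_extractMaximum (S : String) (out : Int) : Prop := out = extractMaximum_alt S
instance (S : String) (out : Int) : Decidable (Spec_extractMaximum S out) := by unfold Spec_extractMaximum; infer_instance

-- ===== CLAIM (what is proved, stated in full; the proofs are below) =====
def Claim_equal_extractMaximum : Prop := ∀ (S : String), Dom_extractMaximum S → Spec_extractMaximum S (extractMaximum S)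

-- ===== LEMMAS AND PROOFS =====

-- A's loop result with final found-check, from an arbitrary state
def pvF (l : List Char) (st : Int × Int × Bool) : Int :=
  let r := l.foldl pvStepA st
  if r.2.2 then max r.1 r.2.1 else r.1

lemma pvMain (l : List Char) : ∀ m : Int,
    (pvF l (m, 0, false) = ((pvRuns l).map pvVal).foldl max m) ∧
    ∀ c : Int, pvF l (m, c, true) =
      ((pvRuns (l.dropWhile PySem.Chars.isdigit)).map pvVal).foldl max
        (max m (List.foldl pvStep c (l.takeWhile PySem.Chars.isdigit))) := by
  induction l with
  | nil =>
    intro m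
    constructor
    · simp [pvF, pvRuns]
    · intro c; simp [pvF, pvRuns, List.foldl]
  | cons a t ih =>
    intro m
    by_cases hd : PySem.Chars.isdigit a
    · constructor
      · have h2 := (ih m).2 (pvStep 0 a)
        simp only [pvF, List.foldl_cons, pvStepA, pvStep, hd, if_true] at h2 ⊢
        rw [h2]
        simp [pvRuns, hd, pvVal, pvStep]
      · intro c
        have h2 := (ih m).2 (pvStep c a)
        simp only [pvF, List.foldl_cons, pvStepA, pvStep, hd, if_true] at h2 ⊢
        rw [h2]
        simp [List.takeWhile, List.dropWhile, hd, pvStep]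
    · constructor
      · have h1 := (ih m).1
        simp only [pvF, List.foldl_cons, pvStepA, hd, Bool.false_eq_true, if_false] at h1 ⊢
        rw [h1]
        simp [pvRuns, hd]
      · intro c
        have h1 := (ih (max m c)).1
        simp only [pvF, List.foldl_cons, pvStepA, hd, Bool.false_eq_true, if_false, if_true] at h1 ⊢
        rw [h1]
        simp [List.takeWhile, List.dropWhile, hd, pvRuns]

-- ===== VERDICT (by name: the statement is the Claim_ definition above) =====
theorem extractMaximum_spec : Claim_equal_extractMaximum := by
  intro S _
  show extractMaximum S = extractMaximum_alt S
  have h := (pvMain S.toList (-1)).1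
  simpa [pvF, extractMaximum, extractMaximum_alt] using h
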